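-- pv_equiv track=rewrite | github.com/yhoo0007/lzss | solutions/q2/encoder_lzss.py | find_ls
-- ===== SOURCE A (Python) =====
-- def find_ls(z_array, end_index):
--     '''
--     Given a z array and an end index, find the right-most maximum value in the z array within the
--     given end index.
--         z_array:    Arbitrary array containing integers.
--         end_index:  The right-most index in which the function will search to (non-inclusive).
--     '''
--     ls_len = 0
--     ls_index = 0
--     for i in range(end_index):
--         n = z_array[i]
--         if n >= ls_len:  # le such that we find the right most index
--             ls_len = n
--             ls_index = i
--     return ls_len, ls_index
-- ===== SOURCE B (Python) =====
-- def find_ls(z_array, end_index):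
--     # Two-pass version: first compute the 0-floored maximum of the prefix,
--     # then scan right-to-left for the first (rightmost) index attaining it.
--     ls_len = 0
--     for i in range(end_index):
--         if z_array[i] > ls_len:
--             ls_len = z_array[i]
--     ls_index = 0
--     i = end_index - 1
--     while i >= 0:
--         if z_array[i] >= ls_len:
--             ls_index = i
--             break
--         i -= 1
--     return ls_len, ls_index
-- ===== Notes on version B (the rewrite author's own statement) =====
-- stated objective: alternative
-- what changed: Replaces the single forward pass that tracks a (max, index) pair with two independent passes: a forward pass computing only the 0-floored maximum, then a reverse scan with early exit that finds the rightmost index attaining it.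
import Mathlib
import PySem

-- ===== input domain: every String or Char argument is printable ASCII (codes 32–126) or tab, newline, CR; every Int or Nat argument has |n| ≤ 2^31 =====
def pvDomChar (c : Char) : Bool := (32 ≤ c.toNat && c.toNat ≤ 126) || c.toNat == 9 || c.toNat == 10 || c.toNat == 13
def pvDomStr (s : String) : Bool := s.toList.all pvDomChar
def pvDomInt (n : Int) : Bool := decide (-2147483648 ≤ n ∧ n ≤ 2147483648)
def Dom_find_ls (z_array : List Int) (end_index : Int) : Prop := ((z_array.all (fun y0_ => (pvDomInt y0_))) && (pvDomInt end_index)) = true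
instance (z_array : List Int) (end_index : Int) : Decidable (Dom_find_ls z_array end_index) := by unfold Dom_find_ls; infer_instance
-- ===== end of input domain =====

-- B is an alternative decomposition of A (two passes instead of one state-pair pass); return value only, no speed claim.

-- ===== PORT A =====
-- the for-loop over range(end_index) as structural recursion on the iteration count
-- (range(e) iterates e.toNat times; indices are in range on Pre_, .getD 0 is never hit there)
def find_ls_loopA (z : List Int) : Nat → Int × Int
  | 0 => (0, 0)
  | k + 1 =>
    let s := find_ls_loopA z k
    let n := (PySem.List.pyGet? z (k : Int)).getD 0
    if s.1 ≤ n then (n, (k : Int)) else s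

def find_ls (z_array : List Int) (end_index : Int) : Int × Int :=
  find_ls_loopA z_array end_index.toNat

-- ===== PORT B =====
-- first pass: ls_len accumulation over range(end_index)
def find_ls_maxpass (z : List Int) : Nat → Int
  | 0 => 0
  | k + 1 =>
    let m := find_ls_maxpass z k
    let n := (PySem.List.pyGet? z (k : Int)).getD 0
    if m < n then n else m

-- second pass: the downward while-loop from end_index-1, i.e. k-1, k-2, …, 0, first hit wins
def find_ls_revfind (z : List Int) (m : Int) : Nat → Int
  | 0 => 0
  | k + 1 =>
    if m ≤ (PySem.List.pyGet? z (k : Int)).getD 0 then (k : Int)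
    else find_ls_revfind z m k

def find_ls_alt (z_array : List Int) (end_index : Int) : Int × Int :=
  let m := find_ls_maxpass z_array end_index.toNat
  (m, find_ls_revfind z_array m end_index.toNat)

-- ===== PRECONDITION & SPEC =====
-- Pre_: Python A raises IndexError when end_index exceeds len(z_array); nothing else is excluded.
def Pre_find_ls (z_array : List Int) (end_index : Int) : Prop := end_index ≤ (z_array.length : Int)
instance (z_array : List Int) (end_index : Int) : Decidable (Pre_find_ls z_array end_index) := by unfold Pre_find_ls; infer_instance
def pvWitness_find_ls : List Int × Int := ([3, -1, 3, 2], 4)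

def Spec_find_ls (z_array : List Int) (end_index : Int) (out : Int × Int) : Prop := out = find_ls_alt z_array end_index
instance (z_array : List Int) (end_index : Int) (out : Int × Int) : Decidable (Spec_find_ls z_array end_index out) := by unfold Spec_find_ls; infer_instance

-- ===== CLAIM (what is proved, stated in full; the proofs are below) =====
def Claim_equal_find_ls : Prop := ∀ (z_array : List Int) (end_index : Int), Dom_find_ls z_array end_index → Pre_find_ls z_array end_index → Spec_find_ls z_array end_index (find_ls z_array end_index)

-- ===== LEMMAS AND PROOFS =====
-- the one-pass state equals (floored max, reverse-first-hit index) at every iteration count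
theorem find_ls_loops_agree (z : List Int) (k : Nat) :
    find_ls_loopA z k = (find_ls_maxpass z k, find_ls_revfind z (find_ls_maxpass z k) k) := by
  induction k with
  | zero => simp [find_ls_loopA, find_ls_maxpass, find_ls_revfind]
  | succ k ih =>
    simp only [find_ls_loopA, find_ls_maxpass, find_ls_revfind, ih]
    set n := (PySem.List.pyGet? z (k : Int)).getD 0 with hn
    by_cases h : find_ls_maxpass z k ≤ n
    · have hm : (if find_ls_maxpass z k < n then n else find_ls_maxpass z k) = n := by
        by_cases h' : find_ls_maxpass z k < n
        · simp [h']
        · simp [h']; omega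
      simp [h, hm]
    · have hm : (if find_ls_maxpass z k < n then n else find_ls_maxpass z k) = find_ls_maxpass z k := by
        simp; omega
      simp [h, hm]

-- ===== VERDICT (by name: the statement is the Claim_ definition above) =====
theorem find_ls_spec : Claim_equal_find_ls := by
  intro z e _ _
  unfold Spec_find_ls find_ls find_ls_alt
  exact find_ls_loops_agree z e.toNat
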